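-- pv_equiv track=rewrite | github.com/grisha-savchenko/ACOM | 940_A.py | find_longest_sequences
-- ===== SOURCE A (Python) =====
-- def find_longest_sequences(arr):
--     max_positive_sum = 0
--     max_negative_sum = 0
--     current_positive_sum = 0
--     current_negative_sum = 0
--     max_positive_length = 0
--     max_negative_length = 0
--     current_positive_length = 0
--     current_negative_length = 0
--
--     for num in arr:
--         if num == 1:
--             # Работаем с положительными числами (1)
--             current_positive_sum += 1
--             current_positive_length += 1
--
--             # Сбрасываем отрицательную последовательность
--             current_negative_sum = 0
--             current_negative_length = 0
--
--             # Обновляем максимальную положительную последовательность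
--             if current_positive_length > max_positive_length:
--                 max_positive_length = current_positive_length
--                 max_positive_sum = current_positive_sum
--             elif current_positive_length == max_positive_length:
--                 max_positive_sum = max(max_positive_sum, current_positive_sum)
--
--         elif num == -1:
--             # Работаем с отрицательными числами (-1)
--             current_negative_sum += -1
--             current_negative_length += 1
--
--             # Сбрасываем положительную последовательность
--             current_positive_sum = 0
--             current_positive_length = 0
--
--             # Обновляем максимальную отрицательную последовательность
--             if current_negative_length > max_negative_length:
--                 max_negative_length = current_negative_length
--                 max_negative_sum = current_negative_sum
--             elif current_negative_length == max_negative_length: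
--                 max_negative_sum = max(max_negative_sum, current_negative_sum)
--
--         elif num == 0:
--             continue
--         else:
--             # Если элемент отличается от 1 или -1, обнуляем текущие суммы
--             current_positive_sum = 0
--             current_positive_length = 0
--             current_negative_sum = 0
--             current_negative_length = 0
--
--     return max_positive_sum, max_negative_sum
-- ===== SOURCE B (Python) =====
-- def find_longest_sequences(arr):
--     # Zeros are transparent in A (they break nothing), so drop them first;
--     # then scan the remaining list run by run: a run of 1s of length L sums
--     # to L and a run of -1s to -L, so only the longest run lengths matter.
--     xs = [x for x in arr if x != 0]
--     max_pos = 0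
--     max_neg = 0
--     i = 0
--     n = len(xs)
--     while i < n:
--         j = i
--         while j < n and xs[j] == xs[i]:
--             j += 1
--         if xs[i] == 1:
--             max_pos = max(max_pos, j - i)
--         elif xs[i] == -1:
--             max_neg = max(max_neg, j - i)
--         i = j
--     return max_pos, -max_neg
-- ===== Notes on version B (the rewrite author's own statement) =====
-- stated objective: simpler
-- what changed: Replaces A's single pass over eight running sum/length counters with manual resets by a filter of the transparent zeros followed by an explicit run-by-run scan that only tracks the longest run of 1s and of -1s (a run's sum equals +/- its length).
import Mathlib
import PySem

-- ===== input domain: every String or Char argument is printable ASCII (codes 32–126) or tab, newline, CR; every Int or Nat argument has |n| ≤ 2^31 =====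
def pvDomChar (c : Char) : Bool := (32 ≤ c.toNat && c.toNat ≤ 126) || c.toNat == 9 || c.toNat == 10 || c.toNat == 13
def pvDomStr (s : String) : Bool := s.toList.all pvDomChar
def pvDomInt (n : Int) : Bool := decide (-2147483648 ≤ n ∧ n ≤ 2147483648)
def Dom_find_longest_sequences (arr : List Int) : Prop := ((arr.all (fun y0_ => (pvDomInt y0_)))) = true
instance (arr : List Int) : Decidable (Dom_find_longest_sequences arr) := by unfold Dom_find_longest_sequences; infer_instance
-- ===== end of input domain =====

-- B replaces A's eight running sum/length counters with a filter of the transparent zeros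
-- followed by a run-by-run scan keeping only the two longest run lengths (objective: simpler).

-- ===== PORT A =====
-- one step of A's for-loop over the 8-tuple state
-- (max_positive_sum, max_negative_sum, current_positive_sum, current_negative_sum,
--  max_positive_length, max_negative_length, current_positive_length, current_negative_length)
def Astep (st : Int × Int × Int × Int × Int × Int × Int × Int) (num : Int) :
    Int × Int × Int × Int × Int × Int × Int × Int :=
  let (mps, mns, cps, cns, mpl, mnl, cpl, cnl) := st
  if num = 1 then
    let cps := cps + 1
    let cpl := cpl + 1
    let cns : Int := 0
    let cnl : Int := 0
    if cpl > mpl then (cps, mns, cps, cns, cpl, mnl, cpl, cnl)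
    else if cpl = mpl then (max mps cps, mns, cps, cns, mpl, mnl, cpl, cnl)
    else (mps, mns, cps, cns, mpl, mnl, cpl, cnl)
  else if num = -1 then
    let cns := cns + (-1)
    let cnl := cnl + 1
    let cps : Int := 0
    let cpl : Int := 0
    if cnl > mnl then (mps, cns, cps, cns, mpl, cnl, cpl, cnl)
    else if cnl = mnl then (mps, max mns cns, cps, cns, mpl, mnl, cpl, cnl)
    else (mps, mns, cps, cns, mpl, mnl, cpl, cnl)
  else if num = 0 then st
  else (mps, mns, 0, 0, mpl, mnl, 0, 0)

def find_longest_sequences (arr : List Int) : Int × Int :=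
  let s := arr.foldl Astep (0, 0, 0, 0, 0, 0, 0, 0)
  (s.1, s.2.1)

-- ===== PORT B =====
-- inner while loop of Source B: length of the leading run of v's, and what follows it
def spanRun (v : Int) : List Int → Nat × List Int
  | [] => (0, [])
  | x :: xs => if x = v then let p := spanRun v xs; (p.1 + 1, p.2) else (0, x :: xs)

-- needed by scanGroups's termination proof
lemma spanRun_len_le (v : Int) (xs : List Int) : (spanRun v xs).2.length ≤ xs.length := by
  induction xs with
  | nil => simp [spanRun]
  | cons x t ih => by_cases h : x = v <;> simp [spanRun, h] <;> omega

-- outer while loop of Source B: consume one run at a time, keep the two maxima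
def scanGroups (xs : List Int) (mp mn : Int) : Int × Int :=
  match xs with
  | [] => (mp, mn)
  | x :: rest =>
    let p := spanRun x rest
    let len : Int := (p.1 : Int) + 1
    if x = 1 then scanGroups p.2 (max mp len) mn
    else if x = -1 then scanGroups p.2 mp (max mn len)
    else scanGroups p.2 mp mn
termination_by xs.length
decreasing_by all_goals (simp only [List.length_cons]; exact Nat.lt_succ_of_le (spanRun_len_le _ _))

def find_longest_sequences_alt (arr : List Int) : Int × Int :=
  let xs := arr.filter (fun x => x != 0)
  let g := scanGroups xs 0 0
  (g.1, -g.2)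

-- ===== PRECONDITION & SPEC =====
def Spec_find_longest_sequences (arr : List Int) (out : Int × Int) : Prop := out = find_longest_sequences_alt arr
instance (arr : List Int) (out : Int × Int) : Decidable (Spec_find_longest_sequences arr out) := by unfold Spec_find_longest_sequences; infer_instance

-- ===== CLAIM (what is proved, stated in full; the proofs are below) =====
def Claim_equal_find_longest_sequences : Prop := ∀ (arr : List Int), Dom_find_longest_sequences arr → Spec_find_longest_sequences arr (find_longest_sequences arr)

-- ===== LEMMAS AND PROOFS =====

-- proof-side simple fold: A's state collapses to (max_pos_len, max_neg_len, cur_pos_len, cur_neg_len)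
def Sstep (s : Int × Int × Int × Int) (x : Int) : Int × Int × Int × Int :=
  let (mp, mn, cp, cn) := s
  if x = 1 then (max mp (cp + 1), mn, cp + 1, 0)
  else if x = -1 then (mp, max mn (cn + 1), 0, cn + 1)
  else if x = 0 then s
  else (mp, mn, 0, 0)

def mirror (s : Int × Int × Int × Int) : Int × Int × Int × Int × Int × Int × Int × Int :=
  (s.1, -s.2.1, s.2.2.1, -s.2.2.2, s.1, s.2.1, s.2.2.1, s.2.2.2)

def proj (s : Int × Int × Int × Int) : Int × Int := (s.1, s.2.1)

lemma Astep_mirror (s : Int × Int × Int × Int) (x : Int) :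
    Astep (mirror s) x = mirror (Sstep s x) := by
  obtain ⟨mp, mn, cp, cn⟩ := s
  simp only [Astep, Sstep, mirror]
  split_ifs <;> simp [Prod.ext_iff] <;> omega

lemma bridge (xs : List Int) (s : Int × Int × Int × Int) :
    List.foldl Astep (mirror s) xs = mirror (List.foldl Sstep s xs) := by
  induction xs generalizing s with
  | nil => rfl
  | cons x t ih => simp only [List.foldl_cons, Astep_mirror, ih]

lemma zeros_transparent (xs : List Int) (s : Int × Int × Int × Int) :
    List.foldl Sstep s (xs.filter (fun x => x != 0)) = List.foldl Sstep s xs := by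
  induction xs generalizing s with
  | nil => rfl
  | cons x t ih =>
    by_cases h : x = 0
    · subst h; simpa [Sstep] using ih s
    · simp only [List.filter_cons, bne_iff_ne, ne_eq, h, not_false_eq_true, if_true,
        List.foldl_cons]
      exact ih _

lemma spanRun_decomp (v : Int) (xs : List Int) :
    xs = List.replicate (spanRun v xs).1 v ++ (spanRun v xs).2 := by
  induction xs with
  | nil => rfl
  | cons x t ih =>
    by_cases h : x = v
    · subst h; simp [spanRun, List.replicate_succ]; exact ih
    · simp [spanRun, h]

lemma spanRun_head (v : Int) (xs : List Int) (y : Int) (t : List Int)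
    (h : (spanRun v xs).2 = y :: t) : y ≠ v := by
  induction xs with
  | nil => simp [spanRun] at h
  | cons x r ih =>
    by_cases hx : x = v
    · subst hx; simp only [spanRun, if_pos rfl] at h; exact ih h
    · have h' : x :: r = y :: t := by simpa [spanRun, hx] using h
      injection h' with h1 _
      exact h1 ▸ hx

lemma runfold_pos (k : Nat) (mp mn cp cn : Int) :
    List.foldl Sstep (mp, mn, cp, cn) (List.replicate (k + 1) 1) =
      (max mp (cp + (k : Int) + 1), mn, cp + (k : Int) + 1, 0) := by
  induction k generalizing mp cp cn with
  | zero => simp [Sstep]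
  | succ k ih =>
    rw [List.replicate_succ, List.foldl_cons,
      show Sstep (mp, mn, cp, cn) 1 = (max mp (cp + 1), mn, cp + 1, 0) from by simp [Sstep], ih]
    refine Prod.ext ?_ (Prod.ext rfl (Prod.ext ?_ rfl)) <;> push_cast <;> simp <;> omega

lemma runfold_neg (k : Nat) (mp mn cp cn : Int) :
    List.foldl Sstep (mp, mn, cp, cn) (List.replicate (k + 1) (-1)) =
      (mp, max mn (cn + (k : Int) + 1), 0, cn + (k : Int) + 1) := by
  induction k generalizing mn cp cn with
  | zero => simp [Sstep]
  | succ k ih =>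
    rw [List.replicate_succ, List.foldl_cons,
      show Sstep (mp, mn, cp, cn) (-1) = (mp, max mn (cn + 1), 0, cn + 1) from by norm_num [Sstep], ih]
    refine Prod.ext rfl (Prod.ext ?_ (Prod.ext rfl ?_)) <;> push_cast <;> simp <;> omega

lemma runfold_other (k : Nat) (x mp mn : Int) (h1 : x ≠ 1) (h2 : x ≠ -1) :
    List.foldl Sstep (mp, mn, 0, 0) (List.replicate k x) = (mp, mn, 0, 0) := by
  induction k with
  | zero => rfl
  | succ k ih =>
    rw [List.replicate_succ, List.foldl_cons,
      show Sstep (mp, mn, 0, 0) x = (mp, mn, 0, 0) from by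
        by_cases h0 : x = 0 <;> simp [Sstep, h0, h1, h2], ih]

lemma reset_pos (xs : List Int) (mp mn cp : Int)
    (hz : ∀ y ∈ xs, y ≠ 0) (hh : ∀ y t, xs = y :: t → y ≠ 1) :
    proj (List.foldl Sstep (mp, mn, cp, 0) xs) = proj (List.foldl Sstep (mp, mn, 0, 0) xs) := by
  cases xs with
  | nil => simp [scanGroups, proj]
  | cons y t =>
    have hy1 : y ≠ 1 := hh y t rfl
    have hy0 : y ≠ 0 := hz y (by simp)
    simp only [List.foldl_cons]
    by_cases hy : y = -1 <;> simp [Sstep, hy, hy1, hy0]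

lemma reset_neg (xs : List Int) (mp mn cn : Int)
    (hz : ∀ y ∈ xs, y ≠ 0) (hh : ∀ y t, xs = y :: t → y ≠ -1) :
    proj (List.foldl Sstep (mp, mn, 0, cn) xs) = proj (List.foldl Sstep (mp, mn, 0, 0) xs) := by
  cases xs with
  | nil => simp [scanGroups, proj]
  | cons y t =>
    have hy1 : y ≠ -1 := hh y t rfl
    have hy0 : y ≠ 0 := hz y (by simp)
    simp only [List.foldl_cons]
    by_cases hy : y = 1 <;> simp [Sstep, hy, hy1, hy0]

lemma scanGroups_eq_fold (xs : List Int) (hz : ∀ y ∈ xs, y ≠ 0) (mp mn : Int) :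
    scanGroups xs mp mn = proj (List.foldl Sstep (mp, mn, 0, 0) xs) := by
  induction hn : xs.length using Nat.strong_induction_on generalizing xs mp mn with
  | _ n ih =>
  cases xs with
  | nil => simp [scanGroups, proj]
  | cons x rest =>
    subst hn
    set p := spanRun x rest with hp
    have hdec : rest = List.replicate p.1 x ++ p.2 := spanRun_decomp x rest
    have hzt : ∀ y ∈ p.2, y ≠ 0 := by
      intro y hy; exact hz y (by rw [hdec]; simp [hy])
    have hlen : p.2.length < (x :: rest).length := by
      simpa using Nat.lt_succ_of_le (spanRun_len_le x rest)
    have hsplit : x :: rest = List.replicate (p.1 + 1) x ++ p.2 := by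
      rw [List.replicate_succ]; simpa using hdec
    have hx0 : x ≠ 0 := hz x (by simp)
    rw [scanGroups]
    by_cases hx1 : x = 1
    · subst hx1
      simp only [if_pos rfl]
      rw [ih _ hlen _ hzt _ _ rfl, hsplit, List.foldl_append, runfold_pos, zero_add]
      exact (reset_pos p.2 _ _ _ hzt
        (fun y t hyt => spanRun_head 1 rest y t (by rw [← hp, hyt]))).symm
    · by_cases hxm : x = -1
      · subst hxm
        simp only [if_neg (by decide : (-1 : Int) ≠ 1), if_pos rfl]
        rw [ih _ hlen _ hzt _ _ rfl, hsplit, List.foldl_append, runfold_neg, zero_add]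
        exact (reset_neg p.2 _ _ _ hzt
          (fun y t hyt => spanRun_head (-1) rest y t (by rw [← hp, hyt]))).symm
      · simp only [if_neg hx1, if_neg hxm]
        rw [ih _ hlen _ hzt _ _ rfl, hsplit, List.foldl_append, runfold_other _ _ _ _ hx1 hxm]

-- ===== VERDICT (by name: the statement is the Claim_ definition above) =====
theorem find_longest_sequences_spec : Claim_equal_find_longest_sequences := by
  intro arr _
  show _ = _
  simp only [find_longest_sequences, find_longest_sequences_alt]
  have hz : ∀ y ∈ arr.filter (fun x => x != 0), y ≠ 0 := by
    intro y hy
    simpa using (List.of_mem_filter hy)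
  rw [scanGroups_eq_fold _ hz, zeros_transparent]
  have hb := bridge arr (0, 0, 0, 0)
  simp only [mirror, neg_zero] at hb
  rw [hb]
  simp [proj, mirror]
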